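-- pv_equiv track=rewrite | github.com/atharvaagrawal/dsa | daily-coding/Check if Number is a Sum of Powers of Three.py | checkPowersOfThree
-- ===== SOURCE A (Python) =====
-- def checkPowersOfThree(n: int) -> bool:
--
--     while n > 1:
--         if n%3 == 0:
--             n = n // 3
--         elif n%3 == 1:
--             n = n - 1
--         elif n%3 == 2:
--             return False
--
--     return True
-- ===== SOURCE B (Python) =====
-- def checkPowersOfThree(n: int) -> bool:
--     powers = []
--     p = 1
--     while p <= n:
--         powers.append(p)
--         p *= 3
--     for q in reversed(powers):
--         if n >= q:
--             n -= q
--     return n == 0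
-- ===== Notes on version B (the rewrite author's own statement) =====
-- stated objective: alternative
-- what changed: B precomputes the table of powers of three and does one descending greedy-subtraction pass over it, instead of A's ascending divide/subtract digit-stripping loop.
-- outside the precondition, e.g. on checkPowersOfThree(-3): A returns True, B returns False; on checkPowersOfThree(-1): A returns True, B returns False
import Mathlib
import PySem

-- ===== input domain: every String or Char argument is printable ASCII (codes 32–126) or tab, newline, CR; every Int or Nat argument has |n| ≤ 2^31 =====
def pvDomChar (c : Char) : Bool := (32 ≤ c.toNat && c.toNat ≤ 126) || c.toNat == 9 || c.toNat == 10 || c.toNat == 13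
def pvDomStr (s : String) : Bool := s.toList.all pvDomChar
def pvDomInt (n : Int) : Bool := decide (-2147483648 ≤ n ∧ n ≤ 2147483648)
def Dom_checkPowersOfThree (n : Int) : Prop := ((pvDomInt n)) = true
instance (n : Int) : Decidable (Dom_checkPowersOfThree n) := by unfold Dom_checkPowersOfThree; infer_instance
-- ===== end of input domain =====

-- B replaces A's ascending divide/subtract digit loop by a precomputed power-of-three
-- table and a descending greedy-subtraction pass (alternative decomposition, same cost).
-- Equivalence is proved on Pre_ (0 ≤ n); negatives are outside the natural domain.

-- ===== PORT A =====
def checkPowersOfThree (n : Int) : Bool :=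
  if n > 1 then
    if PySem.Int.mod n 3 == 0 then checkPowersOfThree (PySem.Int.floordiv n 3)
    else if PySem.Int.mod n 3 == 1 then checkPowersOfThree (n - 1)
    else false
  else true
termination_by n.toNat
decreasing_by
  · rw [PySem.Int.floordiv_eq_ediv_of_pos (by omega)]; omega
  · omega

-- ===== PORT B =====
-- the while-loop building `powers` (p starts at 1; the 0 < p conjunct only makes
-- the recursion total on arbitrary arguments and is invariant under the call below)
def pvPowers (n p : Int) : List Int :=
  if p ≤ n ∧ 0 < p then p :: pvPowers n (p * 3) else []
termination_by (n + 1 - p).toNat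
decreasing_by omega

def checkPowersOfThree_alt (n : Int) : Bool :=
  let powers := pvPowers n 1
  let r := powers.reverse.foldl (fun m q => if q ≤ m then m - q else m) n
  r == 0

-- ===== PRECONDITION & SPEC =====
-- Pre_ restricts to the problem's natural domain of nonnegative n: for negative n the two
-- corner behaviours diverge (A's loop body never runs and it returns True; B's power table
-- is empty and it returns False), and neither value is specified by the task.
def Pre_checkPowersOfThree (n : Int) : Prop := 0 ≤ n
instance (n : Int) : Decidable (Pre_checkPowersOfThree n) := by unfold Pre_checkPowersOfThree; infer_instance
def pvWitness_checkPowersOfThree : Int := (12)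

def Spec_checkPowersOfThree (n : Int) (out : Bool) : Prop := out = checkPowersOfThree_alt n
instance (n : Int) (out : Bool) : Decidable (Spec_checkPowersOfThree n out) := by unfold Spec_checkPowersOfThree; infer_instance

-- ===== CLAIM (what is proved, stated in full; the proofs are below) =====
def Claim_equal_checkPowersOfThree : Prop := ∀ (n : Int), Dom_checkPowersOfThree n → Pre_checkPowersOfThree n → Spec_checkPowersOfThree n (checkPowersOfThree n)

-- ===== LEMMAS AND PROOFS =====

-- the common specification: every base-3 digit of m is at most 1
def pvGood (m : Nat) : Bool :=
  if m ≤ 1 then true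
  else if m % 3 = 2 then false
  else pvGood (m / 3)
termination_by m
decreasing_by omega

theorem pvGood_eq (m : Nat) : pvGood m =
    (if m ≤ 1 then true else if m % 3 = 2 then false else pvGood (m / 3)) := by
  rw [pvGood]

theorem pvGood_zero : pvGood 0 = true := by rw [pvGood_eq]; norm_num
theorem pvGood_one : pvGood 1 = true := by rw [pvGood_eq]; norm_num
theorem pvGood_two' : pvGood 2 = false := by rw [pvGood_eq]; norm_num

-- ---- A-side: A computes pvGood ----
theorem portA_eq_good (m : Nat) : checkPowersOfThree (m : Int) = pvGood m := by
  induction m using Nat.strong_induction_on with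
  | _ m ih =>
    rw [checkPowersOfThree, pvGood_eq]
    by_cases h1 : m ≤ 1
    · simp [show ¬((m : Int) > 1) by omega, h1]
    · have h2 : (m : Int) > 1 := by omega
      simp only [h2, if_pos]
      have hmod : PySem.Int.mod (m : Int) 3 = ((m % 3 : Nat) : Int) := PySem.Int.mod_natCast m 3
      have hdiv : PySem.Int.floordiv (m : Int) 3 = ((m / 3 : Nat) : Int) := PySem.Int.floordiv_natCast m 3
      rcases (show m % 3 = 0 ∨ m % 3 = 1 ∨ m % 3 = 2 by omega) with h | h | h
      · have hb0 : (PySem.Int.mod (m:Int) 3 == (0:Int)) = true := by rw [hmod, h]; decide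
        simp only [hb0, if_true]
        rw [hdiv, ih (m / 3) (by omega), if_neg h1, if_neg (show ¬ m % 3 = 2 by omega)]
      · have hb0 : (PySem.Int.mod (m:Int) 3 == (0:Int)) = false := by rw [hmod, h]; decide
        have hb1 : (PySem.Int.mod (m:Int) 3 == (1:Int)) = true := by rw [hmod, h]; decide
        simp only [hb0, hb1, Bool.false_eq_true, if_false, if_true]
        -- digit 1: A subtracts 1 then (next iteration) divides; m ≥ 4 here
        have hm4 : 4 ≤ m := by omega
        rw [show (m:Int) - 1 = ((m - 1 : Nat) : Int) by omega, ih (m - 1) (by omega), pvGood_eq]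
        rw [if_neg (show ¬ (m - 1 ≤ 1) by omega), if_neg (show ¬ (m - 1) % 3 = 2 by omega)]
        rw [show (m - 1) / 3 = m / 3 by omega, if_neg h1, if_neg (show ¬ m % 3 = 2 by omega)]
      · have hb0 : (PySem.Int.mod (m:Int) 3 == (0:Int)) = false := by rw [hmod, h]; decide
        have hb1 : (PySem.Int.mod (m:Int) 3 == (1:Int)) = false := by rw [hmod, h]; decide
        simp only [hb0, hb1, Bool.false_eq_true, if_false]
        rw [if_neg h1, if_pos h]

-- ---- B-side machinery ----
-- one greedy step
def pvSub (q m : Nat) : Nat := if q ≤ m then m - q else m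

-- descending greedy over 3^(k-1), …, 3^0 (top power first)
def pvGD : Nat → Nat → Nat
  | 0, m => m
  | k+1, m => pvGD k (pvSub (3 ^ k) m)

-- same pass, peeling the smallest power: powers 3^(j+k-1), …, 3^j, with 3^j applied last
def pvGU (j : Nat) : Nat → Nat → Nat
  | 0, m => m
  | k+1, m => pvSub (3 ^ j) (pvGU (j+1) k m)

theorem pvGU_pull (k : Nat) : ∀ j m, pvGU j (k+1) m = pvGU j k (pvSub (3 ^ (j + k)) m) := by
  induction k with
  | zero => intro j m; simp [pvGU]
  | succ k ih =>
    intro j m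
    show pvSub (3^j) (pvGU (j+1) (k+1) m) = pvSub (3^j) (pvGU (j+1) k (pvSub (3 ^ (j+(k+1))) m))
    rw [ih (j+1) m, show j + 1 + k = j + (k+1) by omega]

theorem pvGU_eq_GD (k : Nat) : ∀ m, pvGU 0 k m = pvGD k m := by
  induction k with
  | zero => intro m; rfl
  | succ k ih =>
    intro m
    rw [pvGU_pull k 0 m]
    simp only [Nat.zero_add, pvGD, ih]

-- lower bound: the powers below 3^k cannot remove more than (3^k - 1)/2
theorem pvGD_bound (k : Nat) : ∀ m, m + 1 ≤ 2 * pvGD k m + 3 ^ k := by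
  induction k with
  | zero => intro m; simp [pvGD]; omega
  | succ k ih =>
    intro m
    have h := ih (pvSub (3 ^ k) m)
    have hp : 0 < 3 ^ k := Nat.pow_pos (by omega)
    simp only [pvGD, pvSub] at *
    rw [pow_succ]
    by_cases hc : 3 ^ k ≤ m
    · simp only [if_pos hc] at h ⊢; omega
    · simp only [if_neg hc] at h ⊢; omega

theorem pvGood_add_pow (k : Nat) : ∀ m, m < 3 ^ k → pvGood (3 ^ k + m) = pvGood m := by
  induction k with
  | zero =>
    intro m hm
    interval_cases m
    show pvGood (3 ^ 0 + 0) = pvGood 0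
    norm_num
    rw [pvGood_one, pvGood_zero]
  | succ k ih =>
    intro m hm
    have hp : 0 < 3 ^ k := Nat.pow_pos (by omega)
    have hs : (3:Nat) ^ (k+1) = 3 * 3 ^ k := by rw [pow_succ]; ring
    rw [pvGood_eq]
    have hn2 : ¬(3 ^ (k+1) + m ≤ 1) := by omega
    have hmod : (3 ^ (k+1) + m) % 3 = m % 3 := by omega
    have hdiv : (3 ^ (k+1) + m) / 3 = 3 ^ k + m / 3 := by omega
    simp only [hn2, hmod, hdiv, if_false]
    by_cases h2 : m % 3 = 2
    · have hm2 : ¬ (m ≤ 1) := by omega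
      rw [if_pos h2]
      conv_rhs => rw [pvGood_eq]
      rw [if_neg hm2, if_pos h2]
    · simp only [h2, if_false]
      rw [ih (m / 3) (by omega)]
      by_cases hm1 : m ≤ 1
      · rw [show m / 3 = 0 by omega, pvGood_zero]
        conv_rhs => rw [pvGood_eq]
        rw [if_pos hm1]
      · conv_rhs => rw [pvGood_eq]
        rw [if_neg hm1, if_neg h2]

theorem pvGood_two (k : Nat) : ∀ m, 2 * 3 ^ k ≤ m → m < 3 ^ (k+1) → pvGood m = false := by
  induction k with
  | zero => intro m h1 h2; interval_cases m; exact pvGood_two'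
  | succ k ih =>
    intro m h1 h2
    have hp : 0 < 3 ^ k := Nat.pow_pos (by omega)
    have hs : (3:Nat) ^ (k+1) = 3 * 3 ^ k := by rw [pow_succ]; ring
    have hs2 : (3:Nat) ^ (k+2) = 3 * 3 ^ (k+1) := by rw [pow_succ]; ring
    rw [pvGood_eq]
    simp only [show ¬(m ≤ 1) by omega, if_false]
    by_cases h3 : m % 3 = 2
    · simp [h3]
    · simp only [h3, if_false]
      exact ih (m / 3) (by omega) (by omega)

theorem pvGD_zero_iff (k : Nat) : ∀ m, m < 3 ^ k → (pvGD k m = 0 ↔ pvGood m = true) := by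
  induction k with
  | zero => intro m hm; interval_cases m; simp [pvGD, pvGood_zero]
  | succ k ih =>
    intro m hm
    have hp : 0 < 3 ^ k := Nat.pow_pos (by omega)
    have hs : (3:Nat) ^ (k+1) = 3 * 3 ^ k := by rw [pow_succ]; ring
    simp only [pvGD, pvSub]
    by_cases hge : 3 ^ k ≤ m
    · simp only [hge, if_pos]
      by_cases h2 : m < 2 * 3 ^ k
      · rw [ih (m - 3 ^ k) (by omega)]
        have := pvGood_add_pow k (m - 3 ^ k) (by omega)
        rw [show 3 ^ k + (m - 3 ^ k) = m by omega] at this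
        rw [this]
      · have hfalse := pvGood_two k m (by omega) hm
        have hb := pvGD_bound k (m - 3 ^ k)
        constructor
        · intro h0; omega
        · intro h; rw [h] at hfalse; exact absurd hfalse (by simp)
    · simp only [hge, if_false]
      exact ih m (by omega)
  
-- ---- connecting port B's fold to pvGD ----

theorem pvPowers_unfold (n p : Int) : pvPowers n p =
    (if p ≤ n ∧ 0 < p then p :: pvPowers n (p * 3) else []) := by
  rw [pvPowers]

-- the power list is long enough: n < 3 ^ (j + length)
theorem pvPowers_bound (n : Int) (_hn : 0 ≤ n) : ∀ (fuel : Nat) (j : Nat), (n + 1 - 3 ^ j).toNat ≤ fuel →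
    n < 3 ^ (j + (pvPowers n ((3:Int) ^ j)).length) := by
  intro fuel
  induction fuel with
  | zero =>
    intro j hf
    have hp : (0:Int) < 3 ^ j := by positivity
    rw [pvPowers_unfold]
    have : ¬ ((3:Int) ^ j ≤ n) := by omega
    simp [this]
    omega
  | succ fuel ih =>
    intro j hf
    have hp : (0:Int) < 3 ^ j := by positivity
    rw [pvPowers_unfold]
    by_cases hle : (3:Int) ^ j ≤ n
    · simp only [hle, hp, and_self, if_pos, List.length_cons]
      have heq : (3:Int) ^ j * 3 = 3 ^ (j+1) := by rw [pow_succ]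
      have h3 : (1:Int) ≤ 3 ^ j := by omega
      have hrec := ih (j+1) (by rw [pow_succ]; omega)
      rw [heq]
      rw [show j + ((pvPowers n (3 ^ (j+1))).length + 1) = (j+1) + (pvPowers n ((3:Int) ^ (j+1))).length by omega]
      exact hrec
    · simp [hle]; omega

-- the foldr form of B's reversed-foldl pass equals pvGU on Nat values
theorem pvFoldr_eq_GU (n : Int) (_hn : 0 ≤ n) : ∀ (fuel : Nat) (j : Nat) (m : Nat), (n + 1 - 3 ^ j).toNat ≤ fuel →
    (pvPowers n ((3:Int) ^ j)).foldr (fun q m => if q ≤ m then m - q else m) (m : Int)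
      = ((pvGU j (pvPowers n ((3:Int) ^ j)).length m : Nat) : Int) := by
  intro fuel
  induction fuel with
  | zero =>
    intro j m hf
    have hp : (0:Int) < 3 ^ j := by positivity
    rw [pvPowers_unfold]
    have : ¬ ((3:Int) ^ j ≤ n) := by omega
    simp [this, pvGU]
  | succ fuel ih =>
    intro j m hf
    have hp : (0:Int) < 3 ^ j := by positivity
    rw [pvPowers_unfold]
    by_cases hle : (3:Int) ^ j ≤ n
    · simp only [hle, hp, and_self, if_pos, List.foldr_cons, List.length_cons]
      have heq : (3:Int) ^ j * 3 = 3 ^ (j+1) := by rw [pow_succ]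
      have h3 : (1:Int) ≤ 3 ^ j := by omega
      rw [heq, ih (j+1) m (by rw [pow_succ]; omega)]
      show (if (3:Int) ^ j ≤ _ then _ else _) = _
      have hcast : ((3:Nat) ^ j : Int) = (3:Int) ^ j := by push_cast; ring
      simp only [pvGU, pvSub]
      set g := pvGU (j+1) (pvPowers n ((3:Int) ^ (j+1))).length m with hg
      by_cases hc : (3:Nat) ^ j ≤ g
      · have : (3:Int) ^ j ≤ (g : Int) := by rw [← hcast]; exact_mod_cast hc
        simp [hc, ← hcast]
        omega
      · have : ¬ ((3:Int) ^ j ≤ (g : Int)) := by rw [← hcast]; exact_mod_cast hc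
        simp [this, hc]
    · simp [hle, pvGU]

-- ---- assembling both sides ----

theorem portB_eq_good (n : Int) (hn : 0 ≤ n) : checkPowersOfThree_alt n = pvGood n.toNat := by
  unfold checkPowersOfThree_alt
  simp only [List.foldl_reverse]
  have hm : ((n.toNat : Int)) = n := by omega
  have hfold := pvFoldr_eq_GU n (by omega) (n + 1 - 1).toNat 0 n.toNat (by norm_num)
  rw [hm] at hfold
  rw [show (1:Int) = (3:Int) ^ 0 by norm_num, hfold]
  set k := (pvPowers n ((3:Int) ^ 0)).length with hk
  have hbound : n < 3 ^ (0 + k) := pvPowers_bound n (by omega) (n + 1 - 1).toNat 0 (by norm_num)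
  have hbn : n.toNat < 3 ^ k := by
    have : ((3:Int) ^ (0 + k)) = ((3 ^ (0 + k) : Nat) : Int) := by push_cast; ring
    have h2 : (3:Nat) ^ (0 + k) = 3 ^ k := by norm_num
    omega
  rw [pvGU_eq_GD k]
  have hiff := pvGD_zero_iff k n.toNat hbn
  cases hgood : pvGood n.toNat with
  | true =>
    rw [hgood] at hiff
    have h0 : pvGD k n.toNat = 0 := hiff.mpr rfl
    simp [h0]
  | false =>
    have h0 : pvGD k n.toNat ≠ 0 := fun h => by
      rw [hiff.mp h] at hgood; exact absurd hgood (by simp)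
    simpa using h0

-- ===== VERDICT (by name: the statement is the Claim_ definition above) =====
theorem checkPowersOfThree_spec : Claim_equal_checkPowersOfThree := by
  intro n _ hpre
  unfold Spec_checkPowersOfThree
  have hpre' : 0 ≤ n := hpre
  have hm : ((n.toNat : Int)) = n := by omega
  rw [portB_eq_good n hpre', ← hm, portA_eq_good, Int.toNat_natCast]
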